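-- pv_equiv track=rewrite | github.com/RoccoLoter/DMapS | src/frontend/chips_info_reader.py | _create_commu_qubit_name_list
-- ===== SOURCE A (Python) =====
-- from typing import List, Set, Dict, Tuple, Any
--
-- def _create_commu_qubit_name_list(
--     remote_couplings_info: List[Dict[str, Any]]
-- ) -> Dict[str, List[str]]:
--     """Create remote coupling list using the name of communication qubit"""
--     commu_qubits_info = {}
--
--     for remote_coupling in remote_couplings_info:
--         chip_name_list = list(remote_coupling.keys())[:2]
--         for chip_name in chip_name_list:
--             commu_qubit_name = remote_coupling[chip_name]
--
--             if chip_name in commu_qubits_info: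
--                 if commu_qubit_name not in commu_qubits_info[chip_name]:
--                     commu_qubits_info[chip_name].append(commu_qubit_name)
--             else:
--                 commu_qubits_info.update({chip_name: [commu_qubit_name]})
--
--     return commu_qubits_info
-- ===== SOURCE B (Python) =====
-- def _create_commu_qubit_name_list(remote_couplings_info):
--     """Group-by-first-key recursion: flatten into (chip, qubit) events, then
--     recursively peel off the first chip, collecting its deduplicated names by a
--     scan over the current events, and recurse on the remaining chips' events."""
--     events = [(chip, rc[chip]) for rc in remote_couplings_info
--               for chip in list(rc.keys())[:2]]
--
--     def group(evts):
--         if not evts: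
--             return {}
--         chip = evts[0][0]
--         names = []
--         for c, q in evts:
--             if c == chip and q not in names:
--                 names.append(q)
--         return {chip: names, **group([e for e in evts if e[0] != chip])}
--
--     return group(events)
-- ===== Notes on version B (the rewrite author's own statement) =====
-- stated objective: alternative
-- what changed: B replaces A's single-pass dict accumulation with inline membership checks by a flatten-then-group-by-key recursion: it flattens the couplings into (chip, qubit) events and recursively peels off one chip at a time, collecting that chip's names by a scan and recursing on the filtered remainder.
import Mathlib
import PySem

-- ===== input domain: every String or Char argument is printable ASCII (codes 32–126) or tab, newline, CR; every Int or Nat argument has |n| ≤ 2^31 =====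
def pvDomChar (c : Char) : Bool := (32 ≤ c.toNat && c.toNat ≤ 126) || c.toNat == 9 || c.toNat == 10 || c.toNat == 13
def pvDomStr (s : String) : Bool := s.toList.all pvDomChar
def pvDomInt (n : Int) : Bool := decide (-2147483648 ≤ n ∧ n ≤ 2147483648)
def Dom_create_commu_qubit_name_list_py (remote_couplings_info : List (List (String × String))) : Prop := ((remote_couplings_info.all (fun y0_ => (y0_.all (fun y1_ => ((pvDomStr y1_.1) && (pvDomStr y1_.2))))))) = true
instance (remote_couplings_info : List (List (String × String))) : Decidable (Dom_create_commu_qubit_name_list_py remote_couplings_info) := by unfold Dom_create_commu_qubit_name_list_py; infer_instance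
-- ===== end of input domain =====

-- B replaces A's single-pass dict accumulation (inline membership checks) by a flatten-then-
-- group-by-first-key recursion — an alternative decomposition, no speed claim.

-- ===== PORT A =====
-- 'commu_qubits_info[chip_name]' on the accumulator dict (first match; its keys stay unique)
def pvLookupA (acc : List (String × List String)) (k : String) : List String :=
  match acc with
  | [] => []
  | p :: rest => if p.1 == k then p.2 else pvLookupA rest k

-- 'commu_qubits_info[chip_name].append(commu_qubit_name)'
def pvAppendA (acc : List (String × List String)) (k q : String) : List (String × List String) :=
  acc.map (fun p => if p.1 == k then (p.1, p.2 ++ [q]) else p)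

-- the body of A's inner loop for one chip name
def pvStepA (acc : List (String × List String)) (chip q : String) : List (String × List String) :=
  if acc.any (fun p => p.1 == chip) then
    if q ∈ pvLookupA acc chip then acc else pvAppendA acc chip q
  else acc ++ [(chip, [q])]

def create_commu_qubit_name_list_py (remote_couplings_info : List (List (String × String))) : List (String × List String) :=
  remote_couplings_info.foldl
    (fun acc rc =>
      let d := PySem.Dict.ofList rc
      (d.keys.take 2).foldl (fun acc chip => pvStepA acc chip (d.getD chip "")) acc)
    []

-- ===== PORT B =====
-- the 'names' loop of Source B's group: collect evts' qubits of this chip, skipping repeats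
def pvCollectB (events : List (String × String)) (chip : String) : List String :=
  events.foldl (fun names e => if e.1 == chip && !(names.contains e.2) then names ++ [e.2] else names) []

-- Source B's recursive 'group': peel off the first chip, recurse on the other chips' events
def pvGroupB (events : List (String × String)) : List (String × List String) :=
  match events with
  | [] => []
  | e :: rest =>
      (e.1, pvCollectB (e :: rest) e.1) :: pvGroupB ((e :: rest).filter (fun x => x.1 != e.1))
termination_by events.length
decreasing_by
  simp only [List.filter]
  simp
  exact List.length_filter_le _ _

def create_commu_qubit_name_list_py_alt (remote_couplings_info : List (List (String × String))) : List (String × List String) :=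
  let events := remote_couplings_info.flatMap
    (fun rc =>
      let d := PySem.Dict.ofList rc
      (d.keys.take 2).map (fun chip => (chip, d.getD chip "")))
  pvGroupB events

-- ===== PRECONDITION & SPEC =====
def Spec_create_commu_qubit_name_list_py (remote_couplings_info : List (List (String × String))) (out : List (String × List String)) : Prop := out = create_commu_qubit_name_list_py_alt remote_couplings_info
instance (remote_couplings_info : List (List (String × String))) (out : List (String × List String)) : Decidable (Spec_create_commu_qubit_name_list_py remote_couplings_info out) := by unfold Spec_create_commu_qubit_name_list_py; infer_instance

-- ===== CLAIM (what is proved, stated in full; the proofs are below) =====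
def Claim_equal_create_commu_qubit_name_list_py : Prop := ∀ (remote_couplings_info : List (List (String × String))), Dom_create_commu_qubit_name_list_py remote_couplings_info → Spec_create_commu_qubit_name_list_py remote_couplings_info (create_commu_qubit_name_list_py remote_couplings_info)

-- ===== LEMMAS AND PROOFS =====

-- pvCollectB from an arbitrary starting list (the proof-side generalisation)
def pvExtend (l : List String) (chip : String) (events : List (String × String)) : List String :=
  events.foldl (fun names e => if e.1 == chip && !(names.contains e.2) then names ++ [e.2] else names) l

theorem pvExtend_nil (l : List String) (chip : String) : pvExtend l chip [] = l := rfl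

theorem pvCollectB_eq (events : List (String × String)) (chip : String) :
    pvCollectB events chip = pvExtend [] chip events := rfl

-- pvExtend ignores events whose key the filter removes, provided those keys are ≠ chip
theorem pvExtend_filter (l : List String) (chip : String) (P : String × String → Bool)
    (events : List (String × String)) (h : ∀ e ∈ events, e.1 = chip → P e = true) :
    pvExtend l chip (events.filter P) = pvExtend l chip events := by
  induction events generalizing l with
  | nil => rfl
  | cons e rest ih =>
      have hrest : ∀ e ∈ rest, e.1 = chip → P e = true := fun x hx => h x (List.mem_cons_of_mem _ hx)
      by_cases hP : P e = true
      · rw [List.filter_cons, if_pos hP]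
        simp only [pvExtend, List.foldl_cons]
        exact ih _ hrest
      · rw [List.filter_cons, if_neg hP]
        have hek : (e.1 == chip) = false := by
          by_contra hb
          exact hP (h e List.mem_cons_self (by simpa using Bool.of_not_eq_false hb))
        conv_rhs => simp only [pvExtend, List.foldl_cons]
        rw [show (if (e.1 == chip && !(l.contains e.2)) = true then l ++ [e.2] else l) = l from by
          simp [hek]]
        exact ih l hrest

-- the keys of A's accumulator after a step with the key already present
theorem pvStepA_present (acc : List (String × List String)) (chip q : String)
    (hnd : (acc.map (·.1)).Nodup) (hmem : acc.any (fun p => p.1 == chip) = true) :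
    pvStepA acc chip q
      = acc.map (fun p => if p.1 == chip && !(p.2.contains q) then (p.1, p.2 ++ [q]) else p) := by
  induction acc with
  | nil => simp at hmem
  | cons p rest ih =>
      simp only [List.map_cons, List.nodup_cons] at hnd
      obtain ⟨hnotin, hnd'⟩ := hnd
      unfold pvStepA
      rw [if_pos hmem]
      by_cases hpc : (p.1 == chip) = true
      · have hpc' : p.1 = chip := by simpa using hpc
        have hrest : ∀ r ∈ rest, (r.1 == chip) = false := by
          intro r hr
          by_contra hb
          have : r.1 = chip := by simpa using (Bool.of_not_eq_false hb)
          exact hnotin (List.mem_map.mpr ⟨r, hr, this.trans hpc'.symm⟩)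
        have hrestmap : rest.map (fun p => if p.1 == chip && !(p.2.contains q) then (p.1, p.2 ++ [q]) else p) = rest := by
          conv_rhs => rw [← List.map_id rest]
          exact List.map_congr_left (fun r hr => by simp [hrest r hr])
        rw [show pvLookupA (p :: rest) chip = p.2 from by simp [pvLookupA, hpc]]
        rw [List.map_cons, hrestmap]
        by_cases hq : q ∈ p.2
        · rw [if_pos hq, if_neg (by simp [List.contains_eq_mem, hq])]
        · rw [if_neg hq, if_pos (by simp [List.contains_eq_mem, hpc, hq])]
          unfold pvAppendA
          have happ : rest.map (fun p => if p.1 == chip then (p.1, p.2 ++ [q]) else p) = rest := by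
            conv_rhs => rw [← List.map_id rest]
            exact List.map_congr_left (fun r hr => by simp [hrest r hr])
          rw [List.map_cons, happ, if_pos hpc]
      · have hmem' : rest.any (fun p => p.1 == chip) = true := by
          simpa [List.any_cons, hpc] using hmem
        have ih' := ih hnd' hmem'
        unfold pvStepA at ih'
        rw [if_pos hmem'] at ih'
        rw [show pvLookupA (p :: rest) chip = pvLookupA rest chip from by simp [pvLookupA, hpc]]
        rw [List.map_cons,
          show (if (p.1 == chip && !(p.2.contains q)) = true then (p.1, p.2 ++ [q]) else p) = p from by
            simp [hpc]]
        by_cases hq : q ∈ pvLookupA rest chip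
        · rw [if_pos hq]; rw [if_pos hq] at ih'
          exact congrArg (fun l => p :: l) ih'
        · rw [if_neg hq]; rw [if_neg hq] at ih'
          unfold pvAppendA at ih' ⊢
          rw [List.map_cons,
            show (if (p.1 == chip) = true then (p.1, p.2 ++ [q]) else p) = p from by simp [hpc],
            ih']

theorem pvStepA_absent (acc : List (String × List String)) (chip q : String)
    (hmem : acc.any (fun p => p.1 == chip) = false) :
    pvStepA acc chip q = acc ++ [(chip, [q])] := by
  unfold pvStepA
  rw [if_neg (by simp [hmem])]

theorem pv_any_keys (f : (String × List String) → (String × List String))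
    (hf : ∀ p, (f p).1 = p.1) (acc : List (String × List String)) (x : String) :
    (acc.map f).any (fun p => p.1 == x) = acc.any (fun p => p.1 == x) := by
  induction acc with
  | nil => rfl
  | cons p rest ih => simp only [List.map_cons, List.any_cons, hf, ih]

-- the central invariant: folding A's step over events from acc (nodup keys) is
-- "extend acc's lists" ++ "group the events of the new keys"
theorem pv_main (events : List (String × String)) (acc : List (String × List String))
    (hnd : (acc.map (·.1)).Nodup) :
    events.foldl (fun a e => pvStepA a e.1 e.2) acc
      = acc.map (fun p => (p.1, pvExtend p.2 p.1 events))
        ++ pvGroupB (events.filter (fun e => !(acc.any (fun p => p.1 == e.1)))) := by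
  induction events generalizing acc with
  | nil => simp [pvExtend_nil, pvGroupB]
  | cons e rest ih =>
      simp only [List.foldl_cons]
      by_cases hmem : acc.any (fun p => p.1 == e.1) = true
      · rw [pvStepA_present acc e.1 e.2 hnd hmem]
        have hkeys : (acc.map (fun p => if p.1 == e.1 && !(p.2.contains e.2) then (p.1, p.2 ++ [e.2]) else p)).map (·.1) = acc.map (·.1) := by
          simp only [List.map_map]
          exact List.map_congr_left (fun p _ => by
            simp only [Function.comp_apply]
            split <;> rfl)
        have hany : ∀ x, (acc.map (fun p => if p.1 == e.1 && !(p.2.contains e.2) then (p.1, p.2 ++ [e.2]) else p)).any (fun p => p.1 == x) = acc.any (fun p => p.1 == x) :=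
          pv_any_keys _ (fun p => by split <;> rfl) acc
        rw [ih _ (by rw [hkeys]; exact hnd)]
        congr 1
        · simp only [List.map_map]
          refine List.map_congr_left (fun p hp => ?_)
          simp only [Function.comp]
          split
          · next hcond =>
            simp only [Bool.and_eq_true, Bool.not_eq_eq_eq_not, Bool.not_true] at hcond
            have h1 : p.1 = e.1 := by simpa using hcond.1
            have h2 : e.2 ∉ p.2 := by simpa [List.contains_eq_mem] using hcond.2
            simp [pvExtend, List.foldl_cons, h1, beq_iff_eq, h2]
          · next hcond =>
            simp only [Bool.and_eq_true, not_and, Bool.not_eq_eq_eq_not, Bool.not_true] at hcond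
            by_cases h1 : (p.1 == e.1) = true
            · have h2 : e.2 ∈ p.2 := by simpa [List.contains_eq_mem] using hcond h1
              have h1' : p.1 = e.1 := by simpa using h1
              simp [pvExtend, List.foldl_cons, h1', beq_iff_eq, h2]
            · simp [pvExtend, List.foldl_cons, beq_iff_eq, show ¬ e.1 = p.1 from fun h => h1 (by simp [h])]
        · congr 1
          simp only [List.filter_cons]
          rw [if_neg (by simp [hmem])]
          refine List.filter_congr (fun x _ => ?_)
          rw [hany x.1]
      · have hmem' : acc.any (fun p => p.1 == e.1) = false := by
          simp only [Bool.not_eq_true] at hmem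
          exact hmem
        rw [pvStepA_absent acc e.1 e.2 hmem']
        have hnotin : e.1 ∉ acc.map (·.1) := by
          intro hc
          obtain ⟨p, hp, hpc⟩ := List.mem_map.mp hc
          have h0 := List.any_eq_false.mp hmem' p hp
          simp [hpc] at h0
        have hnd' : ((acc ++ [(e.1, [e.2])]).map (·.1)).Nodup := by
          simp only [List.map_append, List.map_cons, List.map_nil]
          refine List.Nodup.append hnd (List.nodup_singleton _) ?_
          intro a ha hb
          rw [List.mem_singleton] at hb
          exact hnotin (hb ▸ ha)
        rw [ih _ hnd']
        have hkeysnew : ∀ x : String × String,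
            ((acc ++ [(e.1, [e.2])]).any (fun p => p.1 == x.1))
              = (acc.any (fun p => p.1 == x.1) || (e.1 == x.1)) := by
          intro x; simp [List.any_append]
        -- the RHS head: filter keeps e (its key is new)
        have hfe : (e :: rest).filter (fun e' => !(acc.any (fun p => p.1 == e'.1)))
            = e :: rest.filter (fun e' => !(acc.any (fun p => p.1 == e'.1))) := by
          rw [List.filter_cons, if_pos (by simp [hmem'])]
        rw [hfe]
        rw [show pvGroupB (e :: rest.filter (fun e' => !(acc.any (fun p => p.1 == e'.1))))
              = (e.1, pvCollectB (e :: rest.filter (fun e' => !(acc.any (fun p => p.1 == e'.1)))) e.1)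
                :: pvGroupB ((e :: rest.filter (fun e' => !(acc.any (fun p => p.1 == e'.1)))).filter (fun x => x.1 != e.1)) from by
          rw [pvGroupB]]
        simp only [List.map_append, List.map_cons, List.map_nil, List.append_assoc]
        congr 1
        · -- old entries: the first event's key is new, so it does not extend them
          refine List.map_congr_left (fun p hp => ?_)
          have hne : (p.1 == e.1) = false := by
            by_contra hb
            have : p.1 = e.1 := by simpa using (Bool.of_not_eq_false hb)
            exact hnotin (this ▸ List.mem_map.mpr ⟨p, hp, rfl⟩)
          have hne' : ¬ (e.1 = p.1) := fun h => by simp [h] at hne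
          simp [pvExtend, List.foldl_cons, hne']
        · have h2 : pvExtend [e.2] e.1 (rest.filter (fun e' => !(acc.any (fun p => p.1 == e'.1))))
              = pvExtend [e.2] e.1 rest := by
            refine pvExtend_filter _ _ _ _ (fun x hx hxk => ?_)
            simp only [Bool.not_eq_eq_eq_not, Bool.not_true]
            rw [List.any_eq_false]
            intro p hp
            simp only [Bool.not_eq_true, beq_eq_false_iff_ne, ne_eq]
            intro hpe
            exact hnotin (hxk ▸ hpe ▸ List.mem_map.mpr ⟨p, hp, rfl⟩)
          have h1 : pvCollectB (e :: rest.filter (fun e' => !(acc.any (fun p => p.1 == e'.1)))) e.1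
              = pvExtend [e.2] e.1 (rest.filter (fun e' => !(acc.any (fun p => p.1 == e'.1)))) := by
            simp [pvCollectB_eq, pvExtend, List.foldl_cons]
          rw [h1, h2, List.singleton_append]
          congr 1
          -- the recursive groups: the two filters compose
          rw [List.filter_cons, if_neg (by simp), List.filter_filter]
          refine congrArg pvGroupB (List.filter_congr (fun x _ => ?_))
          rw [hkeysnew x]
          by_cases h : x.1 = e.1
          · simp [h]
          · rw [show (e.1 == x.1) = false from beq_eq_false_iff_ne.mpr (Ne.symm h),
                show (x.1 != e.1) = true from by simp [bne, beq_eq_false_iff_ne.mpr h]]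
            simp

-- ===== VERDICT (by name: the statement is the Claim_ definition above) =====
theorem create_commu_qubit_name_list_py_spec : Claim_equal_create_commu_qubit_name_list_py := by
  intro rcs hdom
  unfold Spec_create_commu_qubit_name_list_py create_commu_qubit_name_list_py
    create_commu_qubit_name_list_py_alt
  have hA : rcs.foldl
      (fun acc rc =>
        let d := PySem.Dict.ofList rc
        (d.keys.take 2).foldl (fun acc chip => pvStepA acc chip (d.getD chip "")) acc) []
    = (rcs.flatMap
        (fun rc =>
          let d := PySem.Dict.ofList rc
          (d.keys.take 2).map (fun chip => (chip, d.getD chip "")))).foldl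
        (fun a e => pvStepA a e.1 e.2) [] := by
    clear hdom
    generalize ([] : List (String × List String)) = acc
    induction rcs generalizing acc with
    | nil => rfl
    | cons rc rest ih =>
        simp only [List.foldl_cons, List.flatMap_cons, List.foldl_append, List.foldl_map]
        rw [ih]
  rw [hA, pv_main _ [] (by simp)]
  simp
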